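-- pv_equiv track=rewrite | github.com/tcharding/lang | python/Crypto/Crypt/vigenere.py | top_rated_key
-- ===== SOURCE A (Python) =====
-- def top_rated_key(rated):
--     """return key of top rated message from rated"""
--     top = 0;
--     # first we need the top rating
--     for key, msg, rating in rated:
--         if rating > top:
--             top = rating
--
--     # now get top rated messages
--     top_rated = []
--     for key, msg, rating in rated:
--         if rating == top:
--             top_rated.append(key)
--
--     if len(top_rated) == 1:
--         return top_rated.pop()
--     else:
--         return "*"
-- ===== SOURCE B (Python) =====
-- def top_rated_key(rated):
--     """return key of top rated message from rated"""
--     top = 0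
--     count = 0
--     key_ = "*"
--     for key, msg, rating in rated:
--         if rating > top:
--             top = rating
--             count = 1
--             key_ = key
--         elif rating == top:
--             count += 1
--             key_ = key
--     return key_ if count == 1 else "*"
-- ===== Notes on version B (the rewrite author's own statement) =====
-- stated objective: alternative
-- what changed: Replaces A's two passes (find the top rating, then collect all keys with that rating into a list) by a single pass maintaining three scalars: the running top, a count of entries matching it, and the last matching key; no intermediate list is built.
import Mathlib
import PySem

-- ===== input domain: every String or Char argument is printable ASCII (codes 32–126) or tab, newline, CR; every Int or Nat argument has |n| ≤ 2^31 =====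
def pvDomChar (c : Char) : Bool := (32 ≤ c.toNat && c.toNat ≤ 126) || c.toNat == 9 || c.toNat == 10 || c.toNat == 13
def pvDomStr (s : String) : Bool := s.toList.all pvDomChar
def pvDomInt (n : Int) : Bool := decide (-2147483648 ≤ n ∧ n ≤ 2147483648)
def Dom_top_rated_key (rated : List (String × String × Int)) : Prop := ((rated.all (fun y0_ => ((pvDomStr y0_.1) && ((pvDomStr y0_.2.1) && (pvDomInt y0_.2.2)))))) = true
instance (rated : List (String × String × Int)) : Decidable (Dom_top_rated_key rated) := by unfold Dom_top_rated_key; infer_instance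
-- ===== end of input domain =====

-- B replaces A's two passes and intermediate list by a single pass over three scalars
-- (running top, count of entries matching it, last matching key); same return value.

-- ===== PORT A =====
def top_rated_key (rated : List (String × String × Int)) : String :=
  -- top = 0; for key, msg, rating in rated: if rating > top: top = rating
  let top : Int := rated.foldl (fun t e => if e.2.2 > t then e.2.2 else t) 0
  -- top_rated = []; for ...: if rating == top: top_rated.append(key)
  let top_rated : List String := rated.foldl (fun acc e => if e.2.2 = top then acc ++ [e.1] else acc) []
  -- if len(top_rated) == 1: return top_rated.pop()  (pop() = last element) else "*"
  if top_rated.length == 1 then (top_rated.getLast?).getD "*" else "*"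

-- ===== PORT B =====
def top_rated_key_alt (rated : List (String × String × Int)) : String :=
  -- single pass: state = (top, count, key_), initialised (0, 0, "*")
  let s : Int × Int × String := rated.foldl (fun st e =>
      if e.2.2 > st.1 then (e.2.2, 1, e.1)
      else if e.2.2 = st.1 then (st.1, st.2.1 + 1, e.1)
      else st) (0, 0, "*")
  -- return key_ if count == 1 else "*"
  if s.2.1 == 1 then s.2.2 else "*"

-- ===== PRECONDITION & SPEC =====
def Spec_top_rated_key (rated : List (String × String × Int)) (out : String) : Prop := out = top_rated_key_alt rated
instance (rated : List (String × String × Int)) (out : String) : Decidable (Spec_top_rated_key rated out) := by unfold Spec_top_rated_key; infer_instance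

-- ===== CLAIM (what is proved, stated in full; the proofs are below) =====
def Claim_equal_top_rated_key : Prop := ∀ (rated : List (String × String × Int)), Dom_top_rated_key rated → Spec_top_rated_key rated (top_rated_key rated)

-- ===== LEMMAS AND PROOFS =====

/-- A's first loop: the running maximum (floored at the initial accumulator). -/
def pvAmax (t : Int) (xs : List (String × String × Int)) : Int :=
  xs.foldl (fun t e => if e.2.2 > t then e.2.2 else t) t

theorem pvAmax_ge_init (xs : List (String × String × Int)) (t : Int) : t ≤ pvAmax t xs := by
  induction xs generalizing t with
  | nil => simp [pvAmax]
  | cons x xs ih =>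
    simp only [pvAmax, List.foldl_cons]
    split
    · exact le_trans (le_of_lt (by assumption)) (ih _)
    · exact ih t

theorem pvAmax_ge_mem (xs : List (String × String × Int)) (t : Int)
    (e : String × String × Int) (he : e ∈ xs) : e.2.2 ≤ pvAmax t xs := by
  induction xs generalizing t with
  | nil => cases he
  | cons x xs ih =>
    simp only [pvAmax, List.foldl_cons]
    rcases List.mem_cons.1 he with h | h
    · subst h
      split
      · exact pvAmax_ge_init xs _
      · exact le_trans (by omega) (pvAmax_ge_init xs _)
    · exact ih _ h

theorem pvAmax_concat (xs : List (String × String × Int)) (x : String × String × Int) :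
    pvAmax 0 (xs ++ [x]) = if x.2.2 > pvAmax 0 xs then x.2.2 else pvAmax 0 xs := by
  simp [pvAmax, List.foldl_append]

/-- Invariant for B's single pass: its state is A's max, the number of entries
    hitting it, and the last key hitting it. -/
theorem pvBfold_eq (xs : List (String × String × Int)) :
    xs.foldl (fun st e =>
      if e.2.2 > st.1 then (e.2.2, 1, e.1)
      else if e.2.2 = st.1 then (st.1, st.2.1 + 1, e.1)
      else st) ((0 : Int), (0 : Int), "*")
    = (pvAmax 0 xs,
       ((xs.filter (fun e => e.2.2 = pvAmax 0 xs)).length : Int),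
       (((xs.filter (fun e => e.2.2 = pvAmax 0 xs)).map (·.1)).getLast?).getD "*") := by
  induction xs using List.reverseRecOn with
  | nil => simp [pvAmax]
  | append_singleton xs x ih =>
    rw [List.foldl_append, ih]
    have hmax := pvAmax_concat xs x
    by_cases hgt : x.2.2 > pvAmax 0 xs
    · -- new strict max: no earlier entry can equal it
      have hnone : xs.filter (fun e => e.2.2 = pvAmax 0 (xs ++ [x])) = [] := by
        rw [List.filter_eq_nil_iff]
        intro e he
        have := pvAmax_ge_mem xs 0 e he
        rw [hmax]; simp only [hgt, if_pos]
        simp only [decide_eq_true_eq]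
        omega
      have hx : pvAmax 0 (xs ++ [x]) = x.2.2 := by rw [hmax]; simp [hgt]
      simp only [List.foldl_cons, List.foldl_nil, if_pos hgt]
      rw [List.filter_append, hnone]
      simp [hx]
    · by_cases heq : x.2.2 = pvAmax 0 xs
      · -- equal to the max: count grows, key becomes x's
        have hx : pvAmax 0 (xs ++ [x]) = pvAmax 0 xs := by rw [hmax]; simp [hgt]
        simp only [List.foldl_cons, List.foldl_nil, if_neg hgt, if_pos heq]
        rw [List.filter_append, hx]
        simp [heq]
      · -- below the max: state unchanged, filter unchanged
        have hx : pvAmax 0 (xs ++ [x]) = pvAmax 0 xs := by rw [hmax]; simp [hgt]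
        simp only [List.foldl_cons, List.foldl_nil, if_neg hgt, if_neg heq]
        rw [List.filter_append, hx]
        simp [heq]

-- ===== VERDICT (by name: the statement is the Claim_ definition above) =====
theorem top_rated_key_spec : Claim_equal_top_rated_key := by
  intro rated _
  unfold Spec_top_rated_key top_rated_key top_rated_key_alt
  simp only [pvBfold_eq]
  rw [show (rated.foldl (fun t e => if e.2.2 > t then e.2.2 else t) 0) = pvAmax 0 rated from rfl]
  simp only [PySem.List.foldl_append_ite (fun e : String × String × Int => e.2.2 = pvAmax 0 rated) (fun e : String × String × Int => e.1), List.nil_append]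
  set l := (rated.filter (fun e => e.2.2 = pvAmax 0 rated)).map (·.1) with hl
  have hlen : (rated.filter (fun e => decide (e.2.2 = pvAmax 0 rated))).length = l.length := by
    simp [hl]
  rw [hlen]
  by_cases h1 : l.length = 1
  · simp [h1]
  · have h2 : ¬ ((l.length : Int) = 1) := by exact_mod_cast h1
    simp [h1, h2]
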